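-- pv_equiv track=rewrite | github.com/dzunigae/Herramientas-personales | 5. Extracción de archivos/index.py | es_multimedia
-- ===== SOURCE A (Python) =====
-- def es_multimedia(archivo):
--     #Lista de extensiones
--     extensiones_multimedia = ['.jpg',
--                               '.jpeg',
--                               '.png',
--                               '.gif',
--                               '.bmp',
--                               '.tiff',
--                               '.web',
--                               '.mp4',
--                               '.avi',
--                               '.mkv',
--                               '.mov',
--                               '.wmv',
--                               '.flv']
--     return any(archivo.lower().endswith(extension) for extension in extensiones_multimedia)
-- ===== SOURCE B (Python) =====
-- _EXTENSIONES_MULTIMEDIA = {'.jpg', '.jpeg', '.png', '.gif', '.bmp', '.tiff',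
--                            '.web', '.mp4', '.avi', '.mkv', '.mov', '.wmv', '.flv'}
--
--
-- def es_multimedia(archivo):
--     # Walk the lowercased name from the end, collecting the candidate extension
--     # (reversed); at the last dot do a single set lookup.
--     ext_rev = []
--     for c in reversed(archivo.lower()):
--         ext_rev.append(c)
--         if c == '.':
--             return ''.join(reversed(ext_rev)) in _EXTENSIONES_MULTIMEDIA
--     return False
-- ===== Notes on version B (the rewrite author's own statement) =====
-- stated objective: alternative
-- what changed: Instead of scanning all 13 extensions with endswith, B lowercases once, walks the name from the end to the last dot building the extension, and does one set lookup.
import Mathlib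
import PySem

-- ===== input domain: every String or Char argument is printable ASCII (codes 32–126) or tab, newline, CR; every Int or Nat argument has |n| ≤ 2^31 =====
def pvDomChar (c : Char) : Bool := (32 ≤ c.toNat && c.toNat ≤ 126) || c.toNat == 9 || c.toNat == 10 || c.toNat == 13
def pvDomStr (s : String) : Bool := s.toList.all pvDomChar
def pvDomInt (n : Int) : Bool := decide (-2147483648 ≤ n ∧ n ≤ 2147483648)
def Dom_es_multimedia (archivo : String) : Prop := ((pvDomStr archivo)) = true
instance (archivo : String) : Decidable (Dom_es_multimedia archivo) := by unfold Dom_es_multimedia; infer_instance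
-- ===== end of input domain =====

-- B replaces A's 13 endswith scans by one back-to-front walk to the last dot plus a single set lookup (alternative decomposition, not claimed faster).

-- ===== PORT A =====
def extensionesMultimedia : List String :=
  [".jpg", ".jpeg", ".png", ".gif", ".bmp", ".tiff", ".web",
   ".mp4", ".avi", ".mkv", ".mov", ".wmv", ".flv"]

def es_multimedia (archivo : String) : Bool :=
  extensionesMultimedia.any (fun extension => PySem.Str.endswith (PySem.Str.lower archivo) extension)

-- ===== PORT B =====
-- the Python set _EXTENSIONES_MULTIMEDIA, as a PySem.Set of char lists
def extensionesSet : PySem.Set (List Char) :=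
  PySem.Set.ofList
    [".jpg".toList, ".jpeg".toList, ".png".toList, ".gif".toList, ".bmp".toList,
     ".tiff".toList, ".web".toList, ".mp4".toList, ".avi".toList, ".mkv".toList,
     ".mov".toList, ".wmv".toList, ".flv".toList]

-- the for-loop over reversed(archivo.lower()): first argument = remaining reversed chars, second = ext_rev accumulator
def altLoop : List Char → List Char → Bool
  | [], _ => false
  | c :: rest, extRev =>
      let extRev' := extRev ++ [c]
      if c = '.' then PySem.Set.contains extensionesSet extRev'.reverse else altLoop rest extRev'

def es_multimedia_alt (archivo : String) : Bool :=
  altLoop (PySem.Chars.lower archivo.toList).reverse []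

-- ===== PRECONDITION & SPEC =====
def Spec_es_multimedia (archivo : String) (out : Bool) : Prop := out = es_multimedia_alt archivo
instance (archivo : String) (out : Bool) : Decidable (Spec_es_multimedia archivo out) := by unfold Spec_es_multimedia; infer_instance

-- ===== CLAIM (what is proved, stated in full; the proofs are below) =====
def Claim_equal_es_multimedia : Prop := ∀ (archivo : String), Dom_es_multimedia archivo → Spec_es_multimedia archivo (es_multimedia archivo)

-- ===== LEMMAS AND PROOFS =====

-- every extension starts with '.' and has no further dot
theorem ext_head : ∀ e ∈ (extensionesSet : List (List Char)), e.head? = some '.' ∧ '.' ∉ e.tail := by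
  decide

theorem ext_shape : ∀ e ∈ (extensionesSet : List (List Char)), ∃ t, e = '.' :: t ∧ '.' ∉ t := by
  intro e he
  obtain ⟨h1, h2⟩ := ext_head e he
  cases e with
  | nil => cases h1
  | cons c t =>
    simp only [List.head?_cons, Option.some.injEq] at h1
    subst h1
    exact ⟨t, rfl, h2⟩

theorem contains_iff_mem (e : List Char) :
    PySem.Set.contains extensionesSet e = true ↔ e ∈ (extensionesSet : List (List Char)) := by
  simp [PySem.Set.contains]

-- loop invariant: with acc dot-free, the loop answers "some extension is a suffix of r.reverse ++ acc.reverse"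
theorem altLoop_iff (r acc : List Char) (hacc : '.' ∉ acc) :
    altLoop r acc = true ↔ ∃ e ∈ (extensionesSet : List (List Char)), e <:+ (r.reverse ++ acc.reverse) := by
  induction r generalizing acc with
  | nil =>
    simp only [altLoop, List.reverse_nil, List.nil_append]
    constructor
    · intro h; cases h
    · rintro ⟨e, he, hsuf⟩
      obtain ⟨t, rfl, -⟩ := ext_shape e he
      exact absurd (List.mem_reverse.mp (hsuf.subset List.mem_cons_self)) hacc
  | cons c rest ih =>
    simp only [altLoop]
    by_cases hc : c = '.'
    · subst hc
      rw [show (('.' :: rest).reverse ++ acc.reverse : List Char) = rest.reverse ++ ('.' :: acc.reverse) from by simp]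
      rw [if_pos rfl, show ((acc ++ ['.']).reverse : List Char) = '.' :: acc.reverse from by simp,
        contains_iff_mem]
      constructor
      · intro hmem
        exact ⟨'.' :: acc.reverse, hmem, List.suffix_append _ _⟩
      · rintro ⟨e, he, hsuf⟩
        obtain ⟨t, rfl, ht⟩ := ext_shape e he
        have hs2 : ('.' :: acc.reverse) <:+ (rest.reverse ++ ('.' :: acc.reverse) : List Char) :=
          List.suffix_append _ _
        have hcmp := List.suffix_or_suffix_of_suffix hsuf hs2
        have heq : '.' :: t = '.' :: acc.reverse := by
          rcases hcmp with h | h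
          · rcases List.suffix_cons_iff.mp h with h' | h'
            · exact h'
            · exact absurd (List.mem_reverse.mp (h'.subset List.mem_cons_self)) hacc
          · rcases List.suffix_cons_iff.mp h with h' | h'
            · exact h'.symm
            · exact absurd (h'.subset List.mem_cons_self) ht
        rw [List.cons.injEq] at heq
        rw [heq.2] at he
        exact he
    · rw [if_neg hc]
      have hacc' : '.' ∉ acc ++ [c] := by
        intro h; rcases List.mem_append.mp h with h | h
        · exact hacc h
        · exact hc (List.mem_singleton.mp h).symm
      rw [ih (acc ++ [c]) hacc']
      simp

-- ===== VERDICT (by name: the statement is the Claim_ definition above) =====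
theorem extSet_eq : (extensionesSet : List (List Char)) = [".jpg".toList, ".jpeg".toList, ".png".toList, ".gif".toList, ".bmp".toList, ".tiff".toList, ".web".toList, ".mp4".toList, ".avi".toList, ".mkv".toList, ".mov".toList, ".wmv".toList, ".flv".toList] := by
  decide

theorem es_multimedia_spec : Claim_equal_es_multimedia := by
  intro archivo _
  unfold Spec_es_multimedia es_multimedia es_multimedia_alt
  rw [Bool.eq_iff_iff, altLoop_iff _ [] (by simp)]
  simp only [List.reverse_nil, List.append_nil, List.reverse_reverse, List.any_eq_true]
  constructor
  · rintro ⟨e, he, hend⟩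
    have hsuf : e.toList <:+ PySem.Chars.lower archivo.toList :=
      (PySem.Chars.endswith_iff _ _).mp (by simpa using hend)
    refine ⟨e.toList, ?_, hsuf⟩
    simp only [extensionesMultimedia, List.mem_cons, List.not_mem_nil, or_false] at he
    rcases he with rfl|rfl|rfl|rfl|rfl|rfl|rfl|rfl|rfl|rfl|rfl|rfl|rfl <;> decide
  · rintro ⟨e, he, hsuf⟩
    rw [extSet_eq] at he
    obtain ⟨s, hs, hse⟩ : ∃ s ∈ extensionesMultimedia, s.toList = e := by
      simp only [List.mem_cons, List.not_mem_nil, or_false] at he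
      rcases he with rfl|rfl|rfl|rfl|rfl|rfl|rfl|rfl|rfl|rfl|rfl|rfl|rfl <;> first
        | exact ⟨".jpg", by decide, by decide⟩
        | exact ⟨".jpeg", by decide, by decide⟩
        | exact ⟨".png", by decide, by decide⟩
        | exact ⟨".gif", by decide, by decide⟩
        | exact ⟨".bmp", by decide, by decide⟩
        | exact ⟨".tiff", by decide, by decide⟩
        | exact ⟨".web", by decide, by decide⟩
        | exact ⟨".mp4", by decide, by decide⟩
        | exact ⟨".avi", by decide, by decide⟩
        | exact ⟨".mkv", by decide, by decide⟩
        | exact ⟨".mov", by decide, by decide⟩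
        | exact ⟨".wmv", by decide, by decide⟩
        | exact ⟨".flv", by decide, by decide⟩
    refine ⟨s, hs, ?_⟩
    have h2 : PySem.Chars.endswith (PySem.Chars.lower archivo.toList) s.toList = true :=
      (PySem.Chars.endswith_iff _ _).mpr (hse ▸ hsuf)
    simpa using h2
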